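-- pv_equiv track=rewrite | github.com/ziondtz/cs50-projetos | ler.py | analise
-- ===== SOURCE A (Python) =====
-- def analise(text):
--     empalavras = False
--     palavras = 0
--     emfrases = False
--     frases = 0
--     letras = 0
--     for i in text:
--         if 'A' <= i <= 'Z' or 'a' <= i <= 'z':
--             letras += 1
--         if i == " ":
--             empalavras = False
--         elif i != " " and empalavras == False:
--             empalavras = True
--             palavras += 1
--         if i in [".", "?", "!"]:
--             emfrases = False
--         elif i not in [".", "?", "!"] and emfrases == False:
--             emfrases = True
--             frases += 1
--     return palavras, frases, letras
-- ===== SOURCE B (Python) =====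
-- def analise(text):
--     # Three independent stateless passes: count run-starts by pairing each char
--     # with its predecessor (virtual ' ' / '.' before the first char), no flags.
--     palavras = sum(1 for p, c in zip(' ' + text, text) if c != ' ' and p == ' ')
--     frases = sum(1 for p, c in zip('.' + text, text) if c not in '.?!' and p in '.?!')
--     letras = sum(1 for c in text if 'A' <= c <= 'Z' or 'a' <= c <= 'z')
--     return (palavras, frases, letras)
-- ===== Notes on version B (the rewrite author's own statement) =====
-- stated objective: simpler
-- what changed: Replaced A's single flag-driven state-machine loop (two mutable booleans plus three counters) by three independent stateless comprehensions that count run-starts by pairing each character with its predecessor (with a virtual ' ' / '.' before the first character) and letters directly.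
import Mathlib
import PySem

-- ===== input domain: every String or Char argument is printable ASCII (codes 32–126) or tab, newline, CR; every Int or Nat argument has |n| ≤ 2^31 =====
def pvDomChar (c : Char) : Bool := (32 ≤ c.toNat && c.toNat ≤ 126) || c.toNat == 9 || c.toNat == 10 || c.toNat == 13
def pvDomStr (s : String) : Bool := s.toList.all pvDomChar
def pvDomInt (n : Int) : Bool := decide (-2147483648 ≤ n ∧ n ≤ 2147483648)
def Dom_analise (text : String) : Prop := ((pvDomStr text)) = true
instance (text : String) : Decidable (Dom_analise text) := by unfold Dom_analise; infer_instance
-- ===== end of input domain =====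

-- B replaces A's single flag-driven state-machine loop by three independent
-- stateless passes that count run-starts via pairing each char with its
-- predecessor (objective: simpler).


-- ===== PORT A =====
-- literal transliteration of A's loop: one pass carrying
-- (empalavras, palavras, emfrases, frases, letras)
def analiseStep (st : Bool × Int × Bool × Int × Int) (i : Char) :
    Bool × Int × Bool × Int × Int :=
  let empalavras := st.1
  let palavras := st.2.1
  let emfrases := st.2.2.1
  let frases := st.2.2.2.1
  let letras := st.2.2.2.2
  let letras := if ('A' ≤ i ∧ i ≤ 'Z') ∨ ('a' ≤ i ∧ i ≤ 'z') then letras + 1 else letras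
  let wp : Bool × Int :=
    if i = ' ' then (false, palavras)
    else if i ≠ ' ' ∧ empalavras = false then (true, palavras + 1)
    else (empalavras, palavras)
  let sp : Bool × Int :=
    if i ∈ ['.', '?', '!'] then (false, frases)
    else if i ∉ ['.', '?', '!'] ∧ emfrases = false then (true, frases + 1)
    else (emfrases, frases)
  (wp.1, wp.2, sp.1, sp.2, letras)

def analise (text : String) : Int × Int × Int :=
  let r := text.toList.foldl analiseStep (false, 0, false, 0, 0)
  (r.2.1, r.2.2.2.1, r.2.2.2.2)

-- ===== PORT B =====
-- 'p in ".?!"' of Source B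
def isTermB (c : Char) : Bool := c = '.' || c = '?' || c = '!'

def analise_alt (text : String) : Int × Int × Int :=
  let l := text.toList
  let palavras : Int :=
    (((' ' :: l).zip l).countP (fun pc => decide (pc.2 ≠ ' ') && decide (pc.1 = ' ')) : Nat)
  let frases : Int :=
    ((('.' :: l).zip l).countP (fun pc => !isTermB pc.2 && isTermB pc.1) : Nat)
  let letras : Int :=
    (l.countP (fun c => (decide ('A' ≤ c) && decide (c ≤ 'Z')) || (decide ('a' ≤ c) && decide (c ≤ 'z'))) : Nat)
  (palavras, frases, letras)

-- ===== PRECONDITION & SPEC =====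
def Spec_analise (text : String) (out : Int × Int × Int) : Prop := out = analise_alt text
instance (text : String) (out : Int × Int × Int) : Decidable (Spec_analise text out) := by unfold Spec_analise; infer_instance

-- ===== CLAIM (what is proved, stated in full; the proofs are below) =====
def Claim_equal_analise : Prop := ∀ (text : String), Dom_analise text → Spec_analise text (analise text)

-- ===== LEMMAS AND PROOFS =====

-- per-character behaviour of the three independent parts of A's step
theorem wpair (i p : Char) (pal : Int) :
    (if i = ' ' then ((false : Bool), pal)
     else if i ≠ ' ' ∧ (decide (p ≠ ' ')) = false then (true, pal + 1)
     else (decide (p ≠ ' '), pal))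
    = (decide (i ≠ ' '), pal + if decide (i ≠ ' ') && decide (p = ' ') then 1 else 0) := by
  by_cases h1 : i = ' ' <;> by_cases h2 : p = ' ' <;> simp [h1, h2]

theorem spair (i q : Char) (fr : Int) :
    (if i ∈ ['.', '?', '!'] then ((false : Bool), fr)
     else if i ∉ ['.', '?', '!'] ∧ (!(isTermB q)) = false then (true, fr + 1)
     else (!(isTermB q), fr))
    = (!(isTermB i), fr + if !isTermB i && isTermB q then 1 else 0) := by
  have hi : (i ∈ ['.', '?', '!']) ↔ isTermB i = true := by
    simp [isTermB, or_assoc]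
  by_cases h1 : isTermB i <;> by_cases h2 : isTermB q <;>
    simp [hi, h1, h2]

theorem lpart (i : Char) (le : Int) :
    (if ('A' ≤ i ∧ i ≤ 'Z') ∨ ('a' ≤ i ∧ i ≤ 'z') then le + 1 else le)
    = le + if (decide ('A' ≤ i) && decide (i ≤ 'Z')) || (decide ('a' ≤ i) && decide (i ≤ 'z')) then 1 else 0 := by
  by_cases h : ('A' ≤ i ∧ i ≤ 'Z') ∨ ('a' ≤ i ∧ i ≤ 'z') <;> simp [h]

-- loop invariant: after processing l with "previous word char p / previous
-- sentence char q" encoded in the flags, the counters grow by B's zip counts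
theorem analise_loop (l : List Char) : ∀ (p q : Char) (pal fr le : Int),
    List.foldl analiseStep (decide (p ≠ ' '), pal, !(isTermB q), fr, le) l
    = (decide (l.getLastD p ≠ ' '),
       pal + (((p :: l).zip l).countP (fun pc => decide (pc.2 ≠ ' ') && decide (pc.1 = ' ')) : Nat),
       !(isTermB (l.getLastD q)),
       fr + (((q :: l).zip l).countP (fun pc => !isTermB pc.2 && isTermB pc.1) : Nat),
       le + (l.countP (fun c => (decide ('A' ≤ c) && decide (c ≤ 'Z')) || (decide ('a' ≤ c) && decide (c ≤ 'z'))) : Nat)) := by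
  induction l with
  | nil => intro p q pal fr le; simp
  | cons i t ih =>
    intro p q pal fr le
    have hstep : analiseStep (decide (p ≠ ' '), pal, !(isTermB q), fr, le) i
        = (decide (i ≠ ' '),
           pal + (if decide (i ≠ ' ') && decide (p = ' ') then 1 else 0),
           !(isTermB i),
           fr + (if !isTermB i && isTermB q then 1 else 0),
           le + (if (decide ('A' ≤ i) && decide (i ≤ 'Z')) || (decide ('a' ≤ i) && decide (i ≤ 'z')) then 1 else 0)) := by
      show ((if i = ' ' then ((false : Bool), pal)
             else if i ≠ ' ' ∧ (decide (p ≠ ' ')) = false then (true, pal + 1)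
             else (decide (p ≠ ' '), pal)).1,
            (if i = ' ' then ((false : Bool), pal)
             else if i ≠ ' ' ∧ (decide (p ≠ ' ')) = false then (true, pal + 1)
             else (decide (p ≠ ' '), pal)).2,
            (if i ∈ ['.', '?', '!'] then ((false : Bool), fr)
             else if i ∉ ['.', '?', '!'] ∧ (!(isTermB q)) = false then (true, fr + 1)
             else (!(isTermB q), fr)).1,
            (if i ∈ ['.', '?', '!'] then ((false : Bool), fr)
             else if i ∉ ['.', '?', '!'] ∧ (!(isTermB q)) = false then (true, fr + 1)
             else (!(isTermB q), fr)).2,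
            (if ('A' ≤ i ∧ i ≤ 'Z') ∨ ('a' ≤ i ∧ i ≤ 'z') then le + 1 else le)) = _
      rw [wpair, spair, lpart]
    rw [List.foldl_cons, hstep, ih i i]
    simp only [List.zip_cons_cons, List.countP_cons, List.getLastD_cons, Prod.mk.injEq]
    and_intros <;> first
      | trivial
      | (split_ifs <;> simp_all <;> try ring)

-- ===== VERDICT (by name: the statement is the Claim_ definition above) =====
theorem analise_spec : Claim_equal_analise := by
  intro text _
  unfold Spec_analise analise analise_alt
  have h0 : (false : Bool) = decide ((' ' : Char) ≠ ' ') := by decide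
  have h1 : (false : Bool) = !(isTermB '.') := by decide
  rw [show ((false, (0 : Int), false, (0 : Int), (0 : Int)) : Bool × Int × Bool × Int × Int)
      = (decide ((' ' : Char) ≠ ' '), 0, !(isTermB '.'), 0, 0) by decide]
  rw [analise_loop text.toList ' ' '.' 0 0 0]
  simp
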